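-- pv_equiv track=rewrite | github.com/ikko1250/coder_v1 | docs/build_ordinance_analysis_db.py | compute_table_parse_error
-- ===== SOURCE A (Python) =====
-- from typing import Dict, List, Optional, Sequence, Tuple
--
-- def get_unescaped_pipe_positions(text: str) -> List[int]:
--     positions: List[int] = []
--     escaped = False
--     for idx, ch in enumerate(text):
--         if escaped:
--             escaped = False
--             continue
--         if ch == "\\":
--             escaped = True
--             continue
--         if ch == "|":
--             positions.append(idx)
--     return positions
--
-- def contains_unescaped_pipe(text: str) -> bool:
--     return bool(get_unescaped_pipe_positions(text))
--
-- def split_table_cells(line: str) -> List[str]: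
--     stripped = line.strip()
--     if not stripped:
--         return []
--
--     pipe_positions = get_unescaped_pipe_positions(stripped)
--     if not pipe_positions:
--         return [stripped]
--
--     cells: List[str] = []
--     start_idx = 0
--     for pipe_idx in pipe_positions:
--         cells.append(stripped[start_idx:pipe_idx].strip())
--         start_idx = pipe_idx + 1
--     cells.append(stripped[start_idx:].strip())
--
--     if stripped.startswith("|") and cells:
--         cells = cells[1:]
--     if stripped.endswith("|") and cells:
--         cells = cells[:-1]
--     return cells
--
-- def count_table_columns(line: str) -> int:
--     return len(split_table_cells(line))
--
-- def compute_table_parse_error(table_lines: List[str], expected_columns: Optional[int]) -> int: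
--     if not table_lines or expected_columns is None:
--         return 0
--
--     for line in table_lines:
--         if not contains_unescaped_pipe(line):
--             return 1
--         if count_table_columns(line) != expected_columns:
--             return 1
--     return 0
-- ===== SOURCE B (Python) =====
-- def compute_table_parse_error(table_lines, expected_columns):
--     if expected_columns is None:
--         return 0
--     for line in table_lines:
--         # one escape-aware scan: count unescaped pipes
--         n = 0
--         escaped = False
--         for ch in line:
--             if escaped:
--                 escaped = False
--             elif ch == "\\":
--                 escaped = True
--             elif ch == "|":
--                 n += 1
--         if n == 0:
--             return 1
--         s = line.strip()
--         cols = n + 1 - s.startswith("|") - s.endswith("|")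
--         if cols != expected_columns:
--             return 1
--     return 0
-- ===== Notes on version B (the rewrite author's own statement) =====
-- stated objective: simpler
-- what changed: Replaces the position-list + cell-substring construction (three escape-aware scans and slicing per line) with a single escape-aware counting scan per line and a closed-form column count n+1-startswith-endswith on the stripped line.
import Mathlib
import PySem

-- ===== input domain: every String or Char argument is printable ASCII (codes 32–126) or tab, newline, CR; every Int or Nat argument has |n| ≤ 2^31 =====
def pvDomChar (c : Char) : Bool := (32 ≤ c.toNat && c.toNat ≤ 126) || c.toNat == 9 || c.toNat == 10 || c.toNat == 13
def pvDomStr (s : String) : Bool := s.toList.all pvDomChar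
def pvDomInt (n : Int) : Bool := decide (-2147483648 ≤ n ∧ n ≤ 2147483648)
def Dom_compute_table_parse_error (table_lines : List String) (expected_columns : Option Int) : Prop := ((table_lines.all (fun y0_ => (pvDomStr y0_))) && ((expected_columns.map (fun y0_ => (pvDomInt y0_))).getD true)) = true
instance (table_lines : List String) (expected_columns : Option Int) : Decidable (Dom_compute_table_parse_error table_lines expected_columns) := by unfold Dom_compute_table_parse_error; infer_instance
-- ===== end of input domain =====

-- B replaces A's position lists and cell-substring building with one escape-aware
-- counting scan per line and a closed-form column count (simpler, no allocations).


-- ===== PORT A =====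
-- get_unescaped_pipe_positions: fold over enumerate(text) with (positions, escaped) state
def get_unescaped_pipe_positions (text : List Char) : List Int :=
  ((PySem.List.enumerate text).foldl
    (fun (st : List Int × Bool) (p : Int × Char) =>
      if st.2 then (st.1, false)
      else if p.2 = '\\' then (st.1, true)
      else if p.2 = '|' then (st.1 ++ [p.1], st.2)
      else st) ([], false)).1

def contains_unescaped_pipe (text : List Char) : Bool :=
  !(get_unescaped_pipe_positions text).isEmpty

def pvBuildCells (stripped : List Char) (pipe_positions : List Int) : List (List Char) :=
  let st := pipe_positions.foldl
    (fun (st : List (List Char) × Int) (pipe_idx : Int) =>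
      (st.1 ++ [PySem.Chars.strip (PySem.Chars.slice stripped (some st.2) (some pipe_idx))],
       pipe_idx + 1)) ([], 0)
  st.1 ++ [PySem.Chars.strip (PySem.Chars.slice stripped (some st.2) none)]

def split_table_cells (line : List Char) : List (List Char) :=
  let stripped := PySem.Chars.strip line
  if stripped.isEmpty then []
  else
    let pipe_positions := get_unescaped_pipe_positions stripped
    if pipe_positions.isEmpty then [stripped]
    else
      let cells := pvBuildCells stripped pipe_positions
      let cells := if PySem.Chars.startswith stripped ['|'] && !cells.isEmpty
                   then PySem.List.slice cells (some 1) none else cells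
      if PySem.Chars.endswith stripped ['|'] && !cells.isEmpty
      then PySem.List.slice cells none (some (-1)) else cells

def count_table_columns (line : List Char) : Int :=
  ((split_table_cells line).length : Int)

def pvLoopA : List String → Int → Int
  | [], _ => 0
  | l :: rest, exp =>
    if !(contains_unescaped_pipe l.toList) then 1
    else if count_table_columns l.toList ≠ exp then 1
    else pvLoopA rest exp

def compute_table_parse_error (table_lines : List String) (expected_columns : Option Int) : Int :=
  match expected_columns with
  | none => 0
  | some exp => if table_lines.isEmpty then 0 else pvLoopA table_lines exp

-- ===== PORT B =====
-- one escape-aware scan: number of unescaped pipes in the line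
def pvCountPipes : List Char → Bool → Nat
  | [], _ => 0
  | _ :: cs, true => pvCountPipes cs false
  | c :: cs, false =>
    if c = '\\' then pvCountPipes cs true
    else if c = '|' then pvCountPipes cs false + 1
    else pvCountPipes cs false

def pvLoopB : List String → Int → Int
  | [], _ => 0
  | l :: rest, exp =>
    let n := pvCountPipes l.toList false
    if n = 0 then 1
    else
      let s := PySem.Chars.strip l.toList
      let cols : Int := (n : Int) + 1
        - (if PySem.Chars.startswith s ['|'] then 1 else 0)
        - (if PySem.Chars.endswith s ['|'] then 1 else 0)
      if cols ≠ exp then 1 else pvLoopB rest exp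

def compute_table_parse_error_alt (table_lines : List String) (expected_columns : Option Int) : Int :=
  match expected_columns with
  | none => 0
  | some exp => pvLoopB table_lines exp

-- ===== PRECONDITION & SPEC =====
def Spec_compute_table_parse_error (table_lines : List String) (expected_columns : Option Int) (out : Int) : Prop := out = compute_table_parse_error_alt table_lines expected_columns
instance (table_lines : List String) (expected_columns : Option Int) (out : Int) : Decidable (Spec_compute_table_parse_error table_lines expected_columns out) := by unfold Spec_compute_table_parse_error; infer_instance

-- ===== CLAIM (what is proved, stated in full; the proofs are below) =====
def Claim_equal_compute_table_parse_error : Prop := ∀ (table_lines : List String) (expected_columns : Option Int), Dom_compute_table_parse_error table_lines expected_columns → Spec_compute_table_parse_error table_lines expected_columns (compute_table_parse_error table_lines expected_columns)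

-- ===== LEMMAS AND PROOFS =====

-- structural version of A's enumerate+foldl position scan
def pvPos : List Char → Bool → Int → List Int
  | [], _, _ => []
  | _ :: cs, true, i => pvPos cs false (i + 1)
  | c :: cs, false, i =>
    if c = '\\' then pvPos cs true (i + 1)
    else if c = '|' then i :: pvPos cs false (i + 1)
    else pvPos cs false (i + 1)

theorem pvFold_eq_pos (cs : List Char) (acc : List Int) (esc : Bool) (i : Int) :
    ((PySem.List.enumerate cs i).foldl
      (fun (st : List Int × Bool) (p : Int × Char) =>
        if st.2 then (st.1, false)
        else if p.2 = '\\' then (st.1, true)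
        else if p.2 = '|' then (st.1 ++ [p.1], st.2)
        else st) (acc, esc)).1 = acc ++ pvPos cs esc i := by
  induction cs generalizing acc esc i with
  | nil => simp [PySem.List.enumerate, pvPos]
  | cons c cs ih =>
    rw [PySem.List.enumerate_cons]
    cases esc with
    | true => simp [pvPos, ih]
    | false =>
      by_cases hb : c = '\\'
      · simp [pvPos, hb, ih]
      · by_cases hp : c = '|'
        · simp [pvPos, hp, ih]
        · simp [pvPos, hb, hp, ih]

theorem pos_eq (cs : List Char) :
    get_unescaped_pipe_positions cs = pvPos cs false 0 := by
  simpa using pvFold_eq_pos cs [] false 0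

theorem pos_length (cs : List Char) (esc : Bool) (i : Int) :
    (pvPos cs esc i).length = pvCountPipes cs esc := by
  induction cs generalizing esc i with
  | nil => cases esc <;> simp [pvPos, pvCountPipes]
  | cons c cs ih =>
    cases esc with
    | true => simpa [pvPos, pvCountPipes] using ih false (i + 1)
    | false =>
      by_cases hb : c = '\\'
      · simpa [pvPos, pvCountPipes, hb] using ih true (i + 1)
      · by_cases hp : c = '|'
        · simp [pvPos, pvCountPipes, hp, ih]
        · simp [pvPos, pvCountPipes, hb, hp, ih]

-- final escape state after scanning a list
def pvEsc : List Char → Bool → Bool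
  | [], e => e
  | _ :: cs, true => pvEsc cs false
  | c :: cs, false => if c = '\\' then pvEsc cs true else pvEsc cs false

theorem count_append (xs ys : List Char) (e : Bool) :
    pvCountPipes (xs ++ ys) e = pvCountPipes xs e + pvCountPipes ys (pvEsc xs e) := by
  induction xs generalizing e with
  | nil => simp [pvCountPipes, pvEsc]
  | cons c cs ih =>
    cases e with
    | true => simp [pvCountPipes, pvEsc, ih]
    | false =>
      by_cases hb : c = '\\'
      · simp [pvCountPipes, pvEsc, hb, ih]
      · by_cases hp : c = '|'
        · simp [pvCountPipes, pvEsc, hp, ih]; omega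
        · simp [pvCountPipes, pvEsc, hb, hp, ih]

theorem isspace_not_special {c : Char} (h : PySem.Chars.isspace c = true) :
    c ≠ '\\' ∧ c ≠ '|' := by
  constructor <;> rintro rfl <;> simp [PySem.Chars.isspace] at h

theorem count_all_space (ws : List Char) (h : ∀ c ∈ ws, PySem.Chars.isspace c = true)
    (e : Bool) : pvCountPipes ws e = 0 := by
  induction ws generalizing e with
  | nil => simp [pvCountPipes]
  | cons c cs ih =>
    have hc := isspace_not_special (h c (by simp))
    have ih' := ih (fun x hx => h x (by simp [hx]))
    cases e with
    | true => simp [pvCountPipes, ih']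
    | false => simp [pvCountPipes, hc.1, hc.2, ih']

theorem count_strip (cs : List Char) :
    pvCountPipes (PySem.Chars.strip cs) false = pvCountPipes cs false := by
  unfold PySem.Chars.strip PySem.Chars.lstrip PySem.Chars.rstrip
  have hl : ∀ (l : List Char), pvCountPipes (l.dropWhile PySem.Chars.isspace) false
      = pvCountPipes l false := by
    intro l
    induction l with
    | nil => simp
    | cons c cs ih =>
      by_cases hc : PySem.Chars.isspace c = true
      · have h2 := isspace_not_special hc
        simpa [List.dropWhile_cons, hc, pvCountPipes, h2.1, h2.2] using ih
      · simp [hc]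
  have hr : ∀ (l : List Char),
      pvCountPipes ((l.reverse.dropWhile PySem.Chars.isspace).reverse) false
        = pvCountPipes l false := by
    intro l
    have hsplit : l = (l.reverse.dropWhile PySem.Chars.isspace).reverse
        ++ (l.reverse.takeWhile PySem.Chars.isspace).reverse := by
      have h0 : l.reverse.takeWhile PySem.Chars.isspace
          ++ l.reverse.dropWhile PySem.Chars.isspace = l.reverse :=
        List.takeWhile_append_dropWhile
      calc l = l.reverse.reverse := (List.reverse_reverse l).symm
        _ = (l.reverse.takeWhile PySem.Chars.isspace
              ++ l.reverse.dropWhile PySem.Chars.isspace).reverse := by rw [h0]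
        _ = _ := by rw [List.reverse_append]
    have hw : pvCountPipes ((l.reverse.takeWhile PySem.Chars.isspace).reverse)
        (pvEsc ((l.reverse.dropWhile PySem.Chars.isspace).reverse) false) = 0 :=
      count_all_space _ (fun c hc => List.mem_takeWhile_imp (by simpa using hc)) _
    conv_rhs => rw [hsplit]
    rw [count_append, hw]
    omega
  rw [hr, hl]

theorem contains_iff (cs : List Char) :
    contains_unescaped_pipe cs = true ↔ pvCountPipes cs false ≠ 0 := by
  unfold contains_unescaped_pipe
  have h := pos_length cs false 0
  rw [pos_eq]
  rcases hp : pvPos cs false 0 with _ | ⟨a, l⟩ <;> rw [hp] at h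
  · simp at h ⊢; omega
  · simp at h ⊢; omega

-- the cell-building fold appends exactly one cell per pipe position
theorem cells_fold_length (stripped : List Char) (ps : List Int)
    (acc : List (List Char)) (s0 : Int) :
    ((ps.foldl
      (fun (st : List (List Char) × Int) (pipe_idx : Int) =>
        (st.1 ++ [PySem.Chars.strip (PySem.Chars.slice stripped (some st.2) (some pipe_idx))],
         pipe_idx + 1)) (acc, s0)).1).length = acc.length + ps.length := by
  induction ps generalizing acc s0 with
  | nil => simp
  | cons p ps ih =>
    rw [List.foldl_cons, ih]
    simp
    omega

theorem build_cells_length (stripped : List Char) (ps : List Int) :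
    (pvBuildCells stripped ps).length = ps.length + 1 := by
  unfold pvBuildCells
  rw [List.length_append, cells_fold_length]
  simp

-- closed form for A's column count when the line has at least one unescaped pipe
theorem count_columns_closed (l : List Char) (hn : pvCountPipes l false ≠ 0) :
    count_table_columns l
      = (pvCountPipes l false : Int) + 1
        - (if PySem.Chars.startswith (PySem.Chars.strip l) ['|'] then 1 else 0)
        - (if PySem.Chars.endswith (PySem.Chars.strip l) ['|'] then 1 else 0) := by
  unfold count_table_columns split_table_cells
  have hcnt : pvCountPipes (PySem.Chars.strip l) false = pvCountPipes l false :=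
    count_strip l
  have hposlen : (get_unescaped_pipe_positions (PySem.Chars.strip l)).length
      = pvCountPipes l false := by
    rw [pos_eq, pos_length, hcnt]
  have hpos : (get_unescaped_pipe_positions (PySem.Chars.strip l)).isEmpty = false := by
    rcases hq : get_unescaped_pipe_positions (PySem.Chars.strip l) with _ | _
    · rw [hq] at hposlen; simp at hposlen; omega
    · rfl
  have hse : (PySem.Chars.strip l).isEmpty = false := by
    rcases hq : PySem.Chars.strip l with _ | _
    · rw [hq] at hcnt; simp [pvCountPipes] at hcnt; omega
    · rfl
  simp only [hse, hpos, Bool.false_eq_true, if_false]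
  have hlen : (pvBuildCells (PySem.Chars.strip l)
      (get_unescaped_pipe_positions (PySem.Chars.strip l))).length
      = pvCountPipes l false + 1 := by
    rw [build_cells_length, hposlen]
  set c0 := pvBuildCells (PySem.Chars.strip l)
      (get_unescaped_pipe_positions (PySem.Chars.strip l)) with hc0
  have hge : 1 ≤ pvCountPipes l false := Nat.one_le_iff_ne_zero.mpr hn
  have hne0 : c0.isEmpty = false := by
    rcases hq : c0 with _ | _
    · rw [hq] at hlen; simp at hlen
    · rfl
  have htl : c0.tail.isEmpty = false := by
    rcases hq : c0.tail with _ | _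
    · have h2 := congrArg List.length hq
      rw [List.length_tail, hlen] at h2
      simp at h2
      omega
    · rfl
  rcases hsw : PySem.Chars.startswith (PySem.Chars.strip l) ['|'] with _ | _ <;>
    rcases hew : PySem.Chars.endswith (PySem.Chars.strip l) ['|'] with _ | _ <;>
    simp only [hsw, hew, hne0, htl, Bool.false_and, Bool.true_and, Bool.and_true, Bool.not_false, Bool.false_eq_true, if_false, if_true,
      PySem.List.slice_from_one, PySem.List.slice_to_neg_one,
      List.length_tail, List.length_dropLast, hlen] <;>
    push_cast <;> omega

theorem loop_eq (ls : List String) (exp : Int) : pvLoopA ls exp = pvLoopB ls exp := by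
  induction ls with
  | nil => rfl
  | cons l rest ih =>
    unfold pvLoopA pvLoopB
    by_cases hn : pvCountPipes l.toList false = 0
    · have hcf : contains_unescaped_pipe l.toList = false := by
        rcases h' : contains_unescaped_pipe l.toList with _ | _
        · rfl
        · exact absurd ((contains_iff l.toList).mp h') (by simpa using hn)
      simp [hcf, hn]
    · have hc : contains_unescaped_pipe l.toList = true := by
        rcases h'' : contains_unescaped_pipe l.toList with _ | _
        · exact absurd ((contains_iff l.toList).mpr hn) (by simp [h''])
        · rfl
      simp only [hc, Bool.not_true, Bool.false_eq_true, if_false,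
        count_columns_closed l.toList hn, if_neg hn, ih]

-- ===== VERDICT (by name: the statement is the Claim_ definition above) =====
theorem compute_table_parse_error_spec : Claim_equal_compute_table_parse_error := by
  intro table_lines expected_columns _
  unfold Spec_compute_table_parse_error compute_table_parse_error compute_table_parse_error_alt
  cases expected_columns with
  | none => rfl
  | some exp =>
    cases table_lines with
    | nil => rfl
    | cons l rest => simpa using loop_eq (l :: rest) exp
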